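-- pv_equiv track=rewrite | github.com/AniqJaved/Problems_Algorithms | Easy/Problem_Palindrome_Check/app_v2.py | remove_spaces_special_chars
-- ===== SOURCE A (Python) =====
-- def remove_spaces_special_chars(string):
--     palindrome_list = []
--     for char in string:
--         ord_code = ord(char)
--         if (ord_code >96 and ord_code<123) or (ord_code>64 and ord_code < 91):
--             palindrome_list.append(char)
--
--     palindrome_str = "".join(palindrome_list)
--     return palindrome_str
-- ===== SOURCE B (Python) =====
-- import re
--
-- def remove_spaces_special_chars(string):
--     return re.sub(r'[^a-zA-Z]', '', string)
-- ===== Notes on version B (the rewrite author's own statement) =====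
-- stated objective: idiomatic
-- what changed: Replaces the explicit char-by-char ord-range loop with list accumulation and join by a single regex substitution that deletes every character outside the ASCII-letter class in one C-level engine pass.
import Mathlib
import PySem

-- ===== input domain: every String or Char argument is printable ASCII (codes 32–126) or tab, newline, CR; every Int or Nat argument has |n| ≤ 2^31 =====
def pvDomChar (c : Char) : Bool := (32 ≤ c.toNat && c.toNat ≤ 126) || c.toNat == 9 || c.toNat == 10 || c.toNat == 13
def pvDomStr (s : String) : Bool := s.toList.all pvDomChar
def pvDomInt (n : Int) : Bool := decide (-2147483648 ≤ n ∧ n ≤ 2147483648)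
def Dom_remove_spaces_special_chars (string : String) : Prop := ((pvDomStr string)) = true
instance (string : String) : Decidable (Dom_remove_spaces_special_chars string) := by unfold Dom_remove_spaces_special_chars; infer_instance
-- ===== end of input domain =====

-- B replaces the explicit ord-range loop + join with a single regex substitution
-- re.sub(r'[^a-zA-Z]', '', string); equivalence of the two filters is proved below.

-- ===== PORT A =====
-- loop: append each char whose ord is in (96,123) or (64,91) to palindrome_list, then join
def remove_spaces_special_chars (string : String) : String :=
  let palindrome_list :=
    string.toList.foldl (fun acc char =>
      let ord_code : Int := char.toNat
      if (ord_code > 96 && ord_code < 123) || (ord_code > 64 && ord_code < 91) then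
        acc ++ [char]
      else acc) []
  String.ofList palindrome_list

-- ===== PORT B =====
-- re.sub(r'[^a-zA-Z]', '', s): exact on the domain — the regex deletes every char
-- outside [a-zA-Z], i.e. keeps exactly the chars matching the class; ported as a filter.
def remove_spaces_special_chars_alt (string : String) : String :=
  String.ofList (string.toList.filter (fun c => ('a' ≤ c && c ≤ 'z') || ('A' ≤ c && c ≤ 'Z')))

-- ===== PRECONDITION & SPEC =====
def Spec_remove_spaces_special_chars (string : String) (out : String) : Prop := out = remove_spaces_special_chars_alt string
instance (string : String) (out : String) : Decidable (Spec_remove_spaces_special_chars string out) := by unfold Spec_remove_spaces_special_chars; infer_instance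

-- ===== CLAIM (what is proved, stated in full; the proofs are below) =====
def Claim_equal_remove_spaces_special_chars : Prop := ∀ (string : String), Dom_remove_spaces_special_chars string → Spec_remove_spaces_special_chars string (remove_spaces_special_chars string)

-- ===== LEMMAS AND PROOFS =====

-- A's loop, started from any accumulator, is that accumulator followed by the filter.
theorem pvFoldl_filter (l : List Char) (acc : List Char) :
    l.foldl (fun acc char =>
      let ord_code : Int := char.toNat
      if (ord_code > 96 && ord_code < 123) || (ord_code > 64 && ord_code < 91) then
        acc ++ [char]
      else acc) acc
    = acc ++ l.filter (fun c => ('a' ≤ c && c ≤ 'z') || ('A' ≤ c && c ≤ 'Z')) := by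
  induction l generalizing acc with
  | nil => simp
  | cons c l ih =>
    simp only [List.foldl_cons, List.filter_cons]
    have hiff :
        ((((c.toNat : Int) > 96 && (c.toNat : Int) < 123) ||
          ((c.toNat : Int) > 64 && (c.toNat : Int) < 91)) = true)
        ↔ ((('a' ≤ c && c ≤ 'z') || ('A' ≤ c && c ≤ 'Z')) = true) := by
      have h1 : ('a').val.toNat = 97 := rfl
      have h2 : ('z').val.toNat = 122 := rfl
      have h3 : ('A').val.toNat = 65 := rfl
      have h4 : ('Z').val.toNat = 90 := rfl
      simp only [gt_iff_lt, Bool.or_eq_true, Bool.and_eq_true, decide_eq_true_eq,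
        Char.le_def, UInt32.le_iff_toNat_le, Char.toNat, h1, h2, h3, h4]
      omega
    by_cases h : (('a' ≤ c && c ≤ 'z') || ('A' ≤ c && c ≤ 'Z')) = true
    · rw [if_pos (hiff.mpr h), ih, h]
      simp
    · rw [if_neg (fun hc => h (hiff.mp hc)), ih]
      simp [h]

-- ===== VERDICT (by name: the statement is the Claim_ definition above) =====
theorem remove_spaces_special_chars_spec : Claim_equal_remove_spaces_special_chars := by
  intro string _
  unfold Spec_remove_spaces_special_chars remove_spaces_special_chars remove_spaces_special_chars_alt
  rw [pvFoldl_filter]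
  simp
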